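-- pv_equiv track=rewrite | github.com/Joja81/Advent-of-Code-2024 | day7/day7.py | part2CheckEquation
-- ===== SOURCE A (Python) =====
-- def part2CheckEquation(target: int, values: list[int], operators: list[str] = []):
--     if len(values) == 1:
--         return values[0] == target
--     if values[0] > target:
--         return False
--
--     # Try multiplication
--     mulResult = part2CheckEquation(target, [values[0] * values[1]] + values[2:], operators + ['*'])
--
--     # Try addition
--     addResult = part2CheckEquation(target, [values[0] + values[1]] + values[2:], operators + ['+'])
--
--     # Try concatenation
--     conResult = part2CheckEquation(target, [int(str(values[0]) + str(values[1]))] + values[2:], operators + ['+'])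
--
--     return mulResult or addResult or conResult
-- ===== SOURCE B (Python) =====
-- def part2CheckEquation(target: int, values: list[int], operators: list[str] = []):
--     # Iterative dedup'd reachable-value set instead of A's 3-way recursion tree.
--     reachable = {values[0]}
--     for v in values[1:]:
--         reachable = {r
--                      for a in reachable if a <= target
--                      for r in (a * v, a + v, int(str(a) + str(v)))}
--     return target in reachable
-- ===== Notes on version B (the rewrite author's own statement) =====
-- stated objective: alternative
-- what changed: Replaces A's 3-way recursion over suffixes by a single left-to-right loop maintaining a deduplicated set of reachable accumulator values (pruned at > target), checking membership of target at the end.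
import Mathlib
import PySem

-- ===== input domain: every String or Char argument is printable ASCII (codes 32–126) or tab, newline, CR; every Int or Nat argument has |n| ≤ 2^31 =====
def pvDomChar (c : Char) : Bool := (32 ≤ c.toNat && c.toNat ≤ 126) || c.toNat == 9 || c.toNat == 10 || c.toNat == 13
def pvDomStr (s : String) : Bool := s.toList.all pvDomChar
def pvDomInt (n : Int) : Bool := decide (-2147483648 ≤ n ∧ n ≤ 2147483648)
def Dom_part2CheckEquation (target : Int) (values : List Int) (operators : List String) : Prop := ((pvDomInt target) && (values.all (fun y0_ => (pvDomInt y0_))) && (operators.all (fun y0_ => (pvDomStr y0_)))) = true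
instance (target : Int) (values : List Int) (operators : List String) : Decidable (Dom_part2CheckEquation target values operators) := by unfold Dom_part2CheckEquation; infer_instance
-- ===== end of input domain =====

-- B replaces A's 3-way recursion by one loop over a deduplicated set of reachable values; equal return value on Pre_ (both programs raise outside Pre_).

-- ===== PORT A =====
-- int(str(a) + str(b)); `.getD 0` is never reached under Pre_ (the parse succeeds whenever b ≥ 0)
def pyConcat (a b : Int) : Int :=
  (PySem.Int.ofStr? (PySem.Int.toStr a ++ PySem.Int.toStr b)).getD 0

def part2CheckEquation (target : Int) (values : List Int) (operators : List String) : Bool :=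
  match values with
  | [] => false  -- Python raises IndexError here; excluded by Pre_
  | [v] => v == target
  | v0 :: v1 :: rest =>
    if v0 > target then false
    else
      let mulResult := part2CheckEquation target ((v0 * v1) :: rest) (operators ++ ["*"])
      let addResult := part2CheckEquation target ((v0 + v1) :: rest) (operators ++ ["+"])
      let conResult := part2CheckEquation target ((pyConcat v0 v1) :: rest) (operators ++ ["+"])
      mulResult || addResult || conResult
termination_by values.length

-- ===== PORT B =====
def part2CheckEquation_alt (target : Int) (values : List Int) (operators : List String) : Bool :=
  match values with
  | [] => false  -- Python raises IndexError here; excluded by Pre_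
  | v0 :: rest =>
    let final : PySem.Set Int :=
      rest.foldl (fun S v =>
        PySem.Set.ofList (((S : List Int).filter (fun a => a ≤ target)).flatMap
          (fun a => [a * v, a + v, pyConcat a v])))
        (PySem.Set.ofList [v0])
    PySem.Set.contains final target

-- ===== PRECONDITION & SPEC =====
-- All three operations are monotone in the accumulator for a nonnegative right operand, so the
-- minimum reachable accumulator (one linear scan, not a copy of either port's branching recursion)
-- characterizes EXACTLY the inputs on which Python A hits int(str(a)+str(v)) with v < 0 and raises
-- ValueError — B raises on exactly the same inputs; no simpler closed form exists for this set.
def minAccRaises (target m : Int) : List Int → Bool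
  | [] => false
  | v :: rest =>
    if m > target then false
    else if v < 0 then true
    else minAccRaises target (min (m * v) (min (m + v) (pyConcat m v))) rest

-- Pre_ excludes exactly the inputs on which A raises (IndexError on [], ValueError when an
-- unpruned accumulator meets a negative value for concatenation); B raises on the same inputs,
-- and nothing on which A returns a value is excluded.
def Pre_part2CheckEquation (target : Int) (values : List Int) (operators : List String) : Prop :=
  values ≠ [] ∧ minAccRaises target (values.headD 0) values.tail = false
instance (target : Int) (values : List Int) (operators : List String) : Decidable (Pre_part2CheckEquation target values operators) := by unfold Pre_part2CheckEquation; infer_instance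

def pvWitness_part2CheckEquation : Int × List Int × List String := (3267, [81, 40, 27], [])

def Spec_part2CheckEquation (target : Int) (values : List Int) (operators : List String) (out : Bool) : Prop := out = part2CheckEquation_alt target values operators
instance (target : Int) (values : List Int) (operators : List String) (out : Bool) : Decidable (Spec_part2CheckEquation target values operators out) := by unfold Spec_part2CheckEquation; infer_instance

-- ===== CLAIM (what is proved, stated in full; the proofs are below) =====
def Claim_equal_part2CheckEquation : Prop := ∀ (target : Int) (values : List Int) (operators : List String), Dom_part2CheckEquation target values operators → Pre_part2CheckEquation target values operators → Spec_part2CheckEquation target values operators (part2CheckEquation target values operators)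

-- ===== LEMMAS AND PROOFS =====

-- A's recursion, with the unused `operators` argument stripped: accumulator a against remaining list
def goA (target a : Int) : List Int → Bool
  | [] => a == target
  | v :: rest =>
    if a > target then false
    else goA target (a * v) rest || goA target (a + v) rest || goA target (pyConcat a v) rest

theorem part2CheckEquation_eq_goA (target : Int) (a : Int) (rest : List Int) (ops : List String) :
    part2CheckEquation target (a :: rest) ops = goA target a rest := by
  induction rest generalizing a ops with
  | nil => simp [part2CheckEquation, goA]
  | cons v rest ih =>
    rw [part2CheckEquation, goA]
    split_ifs with h
    · rfl
    · simp only [ih]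

theorem any_ofList {p : Int → Bool} (l : List Int) :
    (PySem.Set.ofList l : List Int).any p = l.any p := by
  rw [Bool.eq_iff_iff]
  simp only [List.any_eq_true]
  constructor
  · rintro ⟨x, hx, hp⟩
    exact ⟨x, (PySem.Set.mem_ofList _ _).1 hx, hp⟩
  · rintro ⟨x, hx, hp⟩
    exact ⟨x, (PySem.Set.mem_ofList _ _).2 hx, hp⟩

theorem foldl_step_contains (target : Int) (rest : List Int) (S : PySem.Set Int) :
    PySem.Set.contains
      (rest.foldl (fun S v =>
        PySem.Set.ofList (((S : List Int).filter (fun a => a ≤ target)).flatMap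
          (fun a => [a * v, a + v, pyConcat a v]))) S) target
    = (S : List Int).any (fun a => goA target a rest) := by
  induction rest generalizing S with
  | nil =>
    rw [Bool.eq_iff_iff]
    simp only [PySem.Set.contains, List.contains_iff_exists_mem_beq, List.any_eq_true,
      beq_iff_eq, goA]
    exact ⟨fun ⟨a, ha, h⟩ => ⟨a, ha, h.symm⟩, fun ⟨a, ha, h⟩ => ⟨a, ha, h.symm⟩⟩
  | cons v rest ih =>
    rw [List.foldl_cons, ih, any_ofList, Bool.eq_iff_iff]
    simp only [List.any_eq_true, List.mem_flatMap, List.mem_filter]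
    constructor
    · rintro ⟨x, ⟨a, ⟨ha, hle⟩, hx⟩, hp⟩
      refine ⟨a, ha, ?_⟩
      rw [goA]
      have : ¬ a > target := by simpa using hle
      rw [if_neg this]
      simp only [List.mem_cons] at hx
      rcases hx with h | h | h | h
      · simp [h ▸ hp]
      · simp [h ▸ hp]
      · simp [h ▸ hp]
      · simp at h
    · rintro ⟨a, ha, hp⟩
      rw [goA] at hp
      by_cases hgt : a > target
      · rw [if_pos hgt] at hp; exact absurd hp (by simp)
      · rw [if_neg hgt] at hp
        simp only [Bool.or_eq_true] at hp
        have hle : decide (a ≤ target) = true := by simpa using (not_lt.mp hgt)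
        rcases hp with (hp | hp) | hp
        · exact ⟨a * v, ⟨a, ⟨ha, hle⟩, by simp⟩, hp⟩
        · exact ⟨a + v, ⟨a, ⟨ha, hle⟩, by simp⟩, hp⟩
        · exact ⟨pyConcat a v, ⟨a, ⟨ha, hle⟩, by simp⟩, hp⟩

theorem alt_eq_goA (target v0 : Int) (rest : List Int) (ops : List String) :
    part2CheckEquation_alt target (v0 :: rest) ops = goA target v0 rest := by
  rw [part2CheckEquation_alt]
  simp only [foldl_step_contains]
  have : (PySem.Set.ofList [v0] : List Int) = [v0] := rfl
  rw [this]
  simp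

-- ===== VERDICT (by name: the statement is the Claim_ definition above) =====
theorem part2CheckEquation_spec : Claim_equal_part2CheckEquation := by
  intro target values operators _ hpre
  unfold Spec_part2CheckEquation
  match values with
  | [] => exact absurd rfl hpre.1
  | v0 :: rest => rw [part2CheckEquation_eq_goA, alt_eq_goA]
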